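-- pv_equiv track=rewrite | github.com/Hiromitsu4676/Practice | load_capacity.py | calc
-- ===== SOURCE A (Python) =====
-- def selection_sort(nlist):
--     '''
--     数値リストを小さい順に並べる
--     '''
--     unsorted=[nlist[i] for i in range(len(nlist))]
--     sorted=[]
--     for x in range(len(nlist)):
--         temp=unsorted[0]
--         order=0
--         for i in range(len(unsorted)):
--             if unsorted[i]<temp:
--                 temp=unsorted[i]
--                 order=i
--
--         sorted.append(temp)
--         del unsorted[order]
--
--     return sorted
--
-- def calc(W,k):
--      # 前処理
--     W=selection_sort(W)
--     sum_W=sum(W)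
--     Capacity_list=[0]*k
--
--     # 最大積載量Pの初期値(init_P)の決定
--     i=0
--     init_P=max(W)
--     while(1):
--         if (init_P+i)*k >=sum_W:
--             init_P=init_P+i
--             break
--         else:
--             i +=1
--     P=init_P
--
--     while(1):
--         # 均等に荷物を入れた時のキャパリスト算出
--         while (1):
--             if len(W)==0:
--                 break
--             else:
--                 temp=W.pop()
--                 if P-Capacity_list[0]>=temp:
--                     Capacity_list[0] +=temp
--                     Capacity_list=selection_sort(Capacity_list)
--                 else:
--                     break
--         #過積載判断
--         if max(Capacity_list)>P:
--             P+=1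
--         else:
--             break
--     return P,Capacity_list
-- ===== SOURCE B (Python) =====
-- def calc(W, k):
--     # sort once with the builtin, compute the initial P by ceiling division,
--     # and keep the bin loads as a sorted list maintained incrementally
--     ws = sorted(W)
--     total = sum(ws)
--     P = max(ws[-1], -(-total // k))
--     loads = [0] * k
--     i = len(ws)
--     while True:
--         while i > 0:
--             w = ws[i - 1]
--             if P - loads[0] < w:
--                 i -= 1          # this weight is consumed (and dropped), as in the greedy
--                 break
--             i -= 1
--             x = loads.pop(0) + w
--             j = 0
--             while j < len(loads) and loads[j] <= x:
--                 j += 1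
--             loads.insert(j, x)
--         if loads[-1] > P:
--             P += 1
--         else:
--             return P, loads
-- ===== Notes on version B (the rewrite author's own statement) =====
-- stated objective: faster
-- what changed: replaces the hand-written O(n^2)/O(k^2) selection sorts and the unit-increment search for init_P with one builtin sort, a closed-form ceiling division for init_P, and a sorted load list maintained by O(k) insertion of the single changed bin
import Mathlib
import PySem

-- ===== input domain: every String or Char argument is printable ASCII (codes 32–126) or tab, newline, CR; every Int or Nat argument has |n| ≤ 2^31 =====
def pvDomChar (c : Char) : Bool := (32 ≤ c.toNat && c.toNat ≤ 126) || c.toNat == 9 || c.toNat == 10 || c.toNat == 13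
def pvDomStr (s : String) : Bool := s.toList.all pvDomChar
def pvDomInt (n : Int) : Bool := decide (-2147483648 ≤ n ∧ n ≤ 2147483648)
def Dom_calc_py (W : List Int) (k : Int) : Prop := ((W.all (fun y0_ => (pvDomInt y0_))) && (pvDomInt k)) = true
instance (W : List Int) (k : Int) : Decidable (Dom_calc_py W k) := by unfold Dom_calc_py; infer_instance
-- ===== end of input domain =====

-- B replaces A's hand-written selection sorts and unit-increment init_P search by one builtin
-- sort, a closed-form ceiling division and O(k) insertion of the single changed bin load.
-- Return-value equivalence only; neither program observably mutates its arguments.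

-- ===== PORT A =====
-- inner 'for i in range(len(unsorted))' scan of selection_sort: running (temp, order)
def ssFind (u : List Int) : Int × Nat :=
  (List.range u.length).foldl
    (fun s i => if u.getD i 0 < s.1 then (u.getD i 0, i) else s)
    (u.headD 0, 0)  -- temp = unsorted[0]: u is nonempty whenever the loop body runs

-- outer 'for x in range(len(nlist))': append the minimum, delete it from unsorted
def ssLoop : Nat → List Int → List Int → List Int
  | 0, _, acc => acc
  | x + 1, u, acc => ssLoop x (u.eraseIdx (ssFind u).2) (acc ++ [(ssFind u).1])

def selectionSort (nlist : List Int) : List Int :=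
  ssLoop nlist.length ((List.range nlist.length).map (fun i => nlist.getD i 0)) []

-- 'while(1): if (init_P+i)*k >= sum_W: …break else i += 1' — fuel makes the search total;
-- the fuel chosen at the call site suffices for every input with k ≥ 1 (Pre_)
def initPLoop (k sumW : Int) : Nat → Int → Int → Int
  | 0, initP, i => initP + i
  | f + 1, initP, i =>
      if (initP + i) * k ≥ sumW then initP + i else initPLoop k sumW f initP (i + 1)

-- inner 'while(1)' of calc: pop from W's end, load the least-loaded bin or break
def calcInner (P : Int) (W cap : List Int) : List Int × List Int :=
  if h : W = [] then (W, cap)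
  else
    let temp := W.getLastD 0            -- W.pop(): last element (W nonempty here)
    let W' := W.dropLast
    if P - PySem.List.pyGetD cap 0 0 ≥ temp then
      calcInner P W' (selectionSort (cap.modifyHead (fun c => c + temp)))
    else (W', cap)
termination_by W.length
decreasing_by
  cases W with
  | nil => exact absurd rfl h
  | cons a l => simp [List.length_dropLast]

-- outer 'while(1)': overload check, P += 1; fuel is a totalization device (sufficient under Pre_)
def calcOuter : Nat → Int → List Int → List Int → Int × List Int
  | 0, P, _, cap => (P, cap)
  | f + 1, P, W, cap =>
      let r := calcInner P W cap
      if (PySem.List.max? r.2 (fun x => x)).getD 0 > P then  -- max(Capacity_list): nonempty under Pre_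
        calcOuter f (P + 1) r.1 r.2
      else (P, r.2)

def calc_py (W : List Int) (k : Int) : Int × List Int :=
  let Ws := selectionSort W
  let sumW := Ws.sum
  let cap := List.replicate k.toNat (0 : Int)               -- [0]*k (empty for k ≤ 0)
  let initP0 := (PySem.List.max? Ws (fun x => x)).getD 0    -- max(W): nonempty under Pre_
  let initP := initPLoop k sumW ((sumW - initP0 * k).toNat + 1) initP0 0
  calcOuter (((Ws.map (fun w => max w 0)).sum - initP).toNat + 1) initP Ws cap

-- ===== PORT B =====
-- insert x after all loads ≤ x (Source B's linear scan + insert)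
def insLoads : List Int → Int → List Int
  | [], x => [x]
  | y :: ys, x => if y ≤ x then y :: insLoads ys x else x :: y :: ys

-- Source B's inner while: i counts the not-yet-consumed prefix of the sorted weights
def altInner (P : Int) (ws : List Int) : Nat → List Int → Nat × List Int
  | 0, loads => (0, loads)
  | i + 1, loads =>
      let w := ws.getD i 0
      if P - PySem.List.pyGetD loads 0 0 < w then (i, loads)
      else altInner P ws i (insLoads loads.tail (PySem.List.pyGetD loads 0 0 + w))

-- Source B's outer while True; fuel is a totalization device (sufficient under Pre_)
def altOuter (ws : List Int) : Nat → Int → Nat → List Int → Int × List Int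
  | 0, P, _, loads => (P, loads)
  | f + 1, P, i, loads =>
      let r := altInner P ws i loads
      if PySem.List.pyGetD r.2 (-1) 0 > P then altOuter ws f (P + 1) r.1 r.2
      else (P, r.2)

def calc_py_alt (W : List Int) (k : Int) : Int × List Int :=
  let ws := PySem.List.sorted W (fun x => x) false
  let total := ws.sum
  let P := max (PySem.List.pyGetD ws (-1) 0) (-(PySem.Int.floordiv (-total) k))
  altOuter ws (((ws.map (fun w => max w 0)).sum - P).toNat + 1) P ws.length
    (List.replicate k.toNat (0 : Int))

-- ===== PRECONDITION & SPEC =====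
-- A raises on W = [] (ValueError from max) and on k ≤ 0 (IndexError on Capacity_list[0],
-- or divergence of the init_P search); exactly those inputs are excluded.
def Pre_calc_py (W : List Int) (k : Int) : Prop := W ≠ [] ∧ 1 ≤ k
instance (W : List Int) (k : Int) : Decidable (Pre_calc_py W k) := by unfold Pre_calc_py; infer_instance
def pvWitness_calc_py : List Int × Int := ([2, 1, 3], 2)

def Spec_calc_py (W : List Int) (k : Int) (out : Int × List Int) : Prop := out = calc_py_alt W k
instance (W : List Int) (k : Int) (out : Int × List Int) : Decidable (Spec_calc_py W k out) := by unfold Spec_calc_py; infer_instance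

-- ===== CLAIM (what is proved, stated in full; the proofs are below) =====
def Claim_equal_calc_py : Prop := ∀ (W : List Int) (k : Int), Dom_calc_py W k → Pre_calc_py W k → Spec_calc_py W k (calc_py W k)

-- ===== LEMMAS AND PROOFS =====

-- canonical sort shorthand used only in proofs
def pvS (l : List Int) : List Int := PySem.List.sorted l (fun x => x) false

lemma insLoads_perm (l : List Int) (x : Int) : (insLoads l x).Perm (x :: l) := by
  induction l with
  | nil => simp [insLoads]
  | cons y ys ih =>
      simp only [insLoads]
      split
      · exact ((ih.cons y).trans (List.Perm.swap x y ys))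
      · exact List.Perm.refl _

lemma insLoads_ne_nil (l : List Int) (x : Int) : insLoads l x ≠ [] := by
  cases l with
  | nil => simp [insLoads]
  | cons y ys => simp only [insLoads]; split <;> simp

lemma mem_insLoads {l : List Int} {x z : Int} (h : z ∈ insLoads l x) : z = x ∨ z ∈ l := by
  have := (insLoads_perm l x).mem_iff.mp h
  simpa using this

lemma insLoads_pairwise (l : List Int) (x : Int) (h : l.Pairwise (· ≤ ·)) :
    (insLoads l x).Pairwise (· ≤ ·) := by
  induction l with
  | nil => simp [insLoads]
  | cons y ys ih =>
      rcases List.pairwise_cons.mp h with ⟨hy, hys⟩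
      simp only [insLoads]
      split
      · rename_i hyx
        refine List.pairwise_cons.mpr ⟨?_, ih hys⟩
        intro z hz
        rcases mem_insLoads hz with rfl | hz
        · exact hyx
        · exact hy z hz
      · rename_i hyx
        have hxy : x < y := lt_of_not_ge hyx
        refine List.pairwise_cons.mpr ⟨?_, h⟩
        intro z hz
        rcases List.mem_cons.mp hz with rfl | hz
        · exact le_of_lt hxy
        · exact le_of_lt (lt_of_lt_of_le hxy (hy z hz))

lemma ssFind_aux (u : List Int) (m : Nat) (hm : m ≤ u.length) (hu : u ≠ []) :
    ((List.range m).foldl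
      (fun s i => if u.getD i 0 < s.1 then (u.getD i 0, i) else s) (u.headD 0, 0)).2 < max m 1 ∧
    u.getD ((List.range m).foldl
      (fun s i => if u.getD i 0 < s.1 then (u.getD i 0, i) else s) (u.headD 0, 0)).2 0
      = ((List.range m).foldl
      (fun s i => if u.getD i 0 < s.1 then (u.getD i 0, i) else s) (u.headD 0, 0)).1 ∧
    ∀ j < m, ((List.range m).foldl
      (fun s i => if u.getD i 0 < s.1 then (u.getD i 0, i) else s) (u.headD 0, 0)).1 ≤ u.getD j 0 := by
  induction m with
  | zero =>
      refine ⟨by simp, ?_, by simp⟩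
      cases u with
      | nil => exact absurd rfl hu
      | cons a l => simp
  | succ n ih =>
      have hn : n ≤ u.length := by omega
      obtain ⟨h1, h2, h3⟩ := ih hn
      rw [List.range_succ, List.foldl_append]
      simp only [List.foldl_cons, List.foldl_nil]
      set s := (List.range n).foldl
        (fun s i => if u.getD i 0 < s.1 then (u.getD i 0, i) else s) (u.headD 0, 0) with hs
      by_cases hc : u.getD n 0 < s.1
      · rw [if_pos hc]
        refine ⟨by omega, rfl, ?_⟩
        intro j hj
        rcases Nat.lt_succ_iff_lt_or_eq.mp hj with hj | rfl
        · exact le_trans (le_of_lt hc) (h3 j hj)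
        · exact le_refl _
      · rw [if_neg hc]
        refine ⟨by omega, h2, ?_⟩
        intro j hj
        rcases Nat.lt_succ_iff_lt_or_eq.mp hj with hj | rfl
        · exact h3 j hj
        · omega

lemma ssFind_spec (u : List Int) (hu : u ≠ []) :
    (ssFind u).2 < u.length ∧ u.getD (ssFind u).2 0 = (ssFind u).1 ∧
      ∀ y ∈ u, (ssFind u).1 ≤ y := by
  have hlen : 1 ≤ u.length := List.length_pos_iff.mpr hu
  obtain ⟨h1, h2, h3⟩ := ssFind_aux u u.length le_rfl hu
  refine ⟨by unfold ssFind; omega, h2, ?_⟩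
  intro y hy
  obtain ⟨j, hj, rfl⟩ := List.mem_iff_getElem.mp hy
  have := h3 j hj
  rwa [List.getD_eq_getElem u 0 hj] at this

lemma ssLoop_eq (n : Nat) : ∀ (u acc : List Int), u.length = n →
    ssLoop n u acc = acc ++ pvS u := by
  induction n with
  | zero =>
      intro u acc hu
      rw [List.length_eq_zero_iff] at hu
      subst hu
      simp [ssLoop, pvS, PySem.List.sorted_eq_nil_iff]
  | succ n ih =>
      intro u acc hu
      have hune : u ≠ [] := by intro h; subst h; simp at hu
      obtain ⟨h1, h2, h3⟩ := ssFind_spec u hune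
      have hlen : (u.eraseIdx (ssFind u).2).length = n := by
        rw [List.length_eraseIdx_of_lt h1, hu]; rfl
      have hperm : ((ssFind u).1 :: u.eraseIdx (ssFind u).2).Perm u := by
        have hp := (List.getElem_cons_eraseIdx_perm h1).symm
        rw [List.getD_eq_getElem u 0 h1] at h2
        rw [h2] at hp; exact hp.symm
      have hsort : pvS u = (ssFind u).1 :: pvS (u.eraseIdx (ssFind u).2) := by
        apply PySem.List.sorted_id_eq_of_perm_of_pairwise
        · exact ((PySem.List.sorted_perm _ _ _).cons _).trans hperm
        · refine List.pairwise_cons.mpr ⟨?_, ?_⟩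
          · intro z hz
            have hz' : z ∈ u.eraseIdx (ssFind u).2 :=
              (PySem.List.mem_sorted (xs := u.eraseIdx (ssFind u).2)
                (key := fun x => x) (rev := false) (x := z)).mp hz
            exact h3 z (List.mem_of_mem_eraseIdx hz')
          · exact PySem.List.sorted_pairwise _ _
      rw [ssLoop, ih _ _ hlen, hsort]
      simp

lemma map_getD_range (l : List Int) : (List.range l.length).map (fun i => l.getD i 0) = l := by
  apply List.ext_getElem
  · simp
  · intro i h1 h2
    have h3 : i < l.length := by simpa using h1
    simp [List.getElem?_eq_getElem h3]

lemma selectionSort_eq (l : List Int) : selectionSort l = pvS l := by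
  unfold selectionSort
  rw [map_getD_range, ssLoop_eq l.length l [] rfl]
  simp

lemma foldl_max_sorted (t : List Int) : ∀ x : Int, (x :: t).Pairwise (· ≤ ·) →
    t.foldl max x = (x :: t).getLast (by simp) := by
  induction t with
  | nil => intro x _; simp
  | cons y t' ih =>
      intro x hp
      have hxy : x ≤ y := (List.pairwise_cons.mp hp).1 y (by simp)
      have hyp : (y :: t').Pairwise (· ≤ ·) := (List.pairwise_cons.mp hp).2
      have hstep : List.foldl max x (y :: t') = List.foldl max y t' := by
        simp [max_eq_right hxy]
      rw [hstep, ih y hyp]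
      simp [List.getLast_cons]

lemma max_getD_of_sorted (l : List Int) (hl : l ≠ []) (hp : l.Pairwise (· ≤ ·)) :
    (PySem.List.max? l (fun x => x)).getD 0 = PySem.List.pyGetD l (-1) 0 := by
  cases l with
  | nil => exact absurd rfl hl
  | cons x t =>
      rw [PySem.List.max?_id_cons, PySem.List.pyGetD_neg_one (x :: t) 0 (by simp)]
      simp [foldl_max_sorted t x hp]

lemma sort_update_eq (c : Int) (cs : List Int) (w : Int) (hp : cs.Pairwise (· ≤ ·)) :
    pvS ((c + w) :: cs) = insLoads cs (c + w) := by
  apply PySem.List.sorted_id_eq_of_perm_of_pairwise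
  · exact insLoads_perm cs (c + w)
  · exact insLoads_pairwise cs (c + w) hp

lemma inner_sim (P : Int) (ws : List Int) :
    ∀ (i : Nat), i ≤ ws.length → ∀ loads, loads ≠ [] → loads.Pairwise (· ≤ ·) →
      calcInner P (ws.take i) loads
          = (ws.take (altInner P ws i loads).1, (altInner P ws i loads).2)
        ∧ (altInner P ws i loads).2 ≠ [] ∧ (altInner P ws i loads).2.Pairwise (· ≤ ·)
        ∧ (altInner P ws i loads).1 ≤ i := by
  intro i
  induction i with
  | zero =>
      intro _ loads hne hp
      rw [calcInner]
      simp [altInner, hne, hp]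
  | succ i ih =>
      intro hi loads hne hp
      have hilt : i < ws.length := hi
      have htake : ws.take (i + 1) = ws.take i ++ [ws[i]] :=
        List.take_succ_eq_append_getElem hilt
      have htne : ws.take (i + 1) ≠ [] :=
        List.ne_nil_of_length_pos (by rw [List.length_take]; omega)
      have hlast : (ws.take (i + 1)).getLastD 0 = ws.getD i 0 := by
        rw [htake, List.getLastD_concat, List.getD_eq_getElem ws 0 hilt]
      have hdrop : (ws.take (i + 1)).dropLast = ws.take i := by
        rw [htake, List.dropLast_concat]
      rw [calcInner]
      rw [dif_neg htne]
      simp only [hlast, hdrop]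
      simp only [altInner]
      by_cases hc : P - PySem.List.pyGetD loads 0 0 < ws.getD i 0
      · rw [if_neg (by omega), if_pos hc]
        exact ⟨rfl, hne, hp, by omega⟩
      · rw [if_pos (by omega), if_neg hc]
        cases loads with
        | nil => exact absurd rfl hne
        | cons c cs =>
            have hcs : cs.Pairwise (· ≤ ·) := (List.pairwise_cons.mp hp).2
            have hupd : selectionSort ((c :: cs).modifyHead (fun x => x + ws.getD i 0))
                = insLoads cs (PySem.List.pyGetD (c :: cs) 0 0 + ws.getD i 0) := by
              rw [PySem.List.pyGetD_zero_cons]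
              simp only [List.modifyHead_cons]
              rw [selectionSort_eq]
              exact sort_update_eq c cs (ws.getD i 0) hcs
            rw [hupd]
            simp only [List.tail_cons]
            obtain ⟨ha, hb, hcp, hd⟩ := ih (by omega)
              (insLoads cs (PySem.List.pyGetD (c :: cs) 0 0 + ws.getD i 0))
              (insLoads_ne_nil _ _)
              (by rw [PySem.List.pyGetD_zero_cons]; exact insLoads_pairwise _ _ hcs)
            exact ⟨ha, hb, hcp, by omega⟩

lemma outer_sim (ws : List Int) :
    ∀ (fuel : Nat) (P : Int) (i : Nat), i ≤ ws.length →
      ∀ loads, loads ≠ [] → loads.Pairwise (· ≤ ·) →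
        calcOuter fuel P (ws.take i) loads = altOuter ws fuel P i loads := by
  intro fuel
  induction fuel with
  | zero => intro P i _ loads _ _; rfl
  | succ f ih =>
      intro P i hi loads hne hp
      obtain ⟨ha, hb, hcp, hd⟩ := inner_sim P ws i hi loads hne hp
      rw [calcOuter, altOuter]
      simp only [ha]
      rw [max_getD_of_sorted _ hb hcp]
      by_cases hc : PySem.List.pyGetD (altInner P ws i loads).2 (-1) 0 > P
      · rw [if_pos hc, if_pos hc]
        exact ih (P + 1) (altInner P ws i loads).1 (by omega) _ hb hcp
      · rw [if_neg hc, if_neg hc]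

lemma initPLoop_aux (k s t a : Int)
    (ht : t * k ≥ s) (hmin : ∀ d, a ≤ d → d < t → d * k < s) :
    ∀ (f : Nat) (i : Int), 0 ≤ i → a + i ≤ t → (t - (a + i)).toNat < f →
      initPLoop k s f a i = t := by
  intro f
  induction f with
  | zero => intro i _ _ hf; omega
  | succ g ih =>
      intro i hi0 hle hf
      rw [initPLoop]
      by_cases hc : (a + i) * k ≥ s
      · rw [if_pos hc]
        by_contra hne
        exact absurd (hmin (a + i) (by omega) (by omega)) (by omega)
      · rw [if_neg hc]
        have hlt : a + i < t := by
          rcases lt_or_eq_of_le hle with h | h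
          · exact h
          · rw [h] at hc; omega
        exact ih (i + 1) (by omega) (by omega) (by omega)

lemma initPLoop_eq (k s a : Int) (hk : 1 ≤ k) :
    initPLoop k s ((s - a * k).toNat + 1) a 0
      = max a (-(PySem.Int.floordiv (-s) k)) := by
  set c := -(PySem.Int.floordiv (-s) k) with hc
  have hceil : (c - 1) * k < s ∧ s ≤ c * k :=
    (PySem.Int.neg_floordiv_neg_eq_iff_of_pos (by omega)).mp hc.symm
  set t := max a c with htdef
  have ht : t * k ≥ s := by
    have hct : c ≤ t := le_max_right a c
    have := mul_le_mul_of_nonneg_right hct (by omega : (0:Int) ≤ k)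
    omega
  have hmin : ∀ d, a ≤ d → d < t → d * k < s := by
    intro d had hd
    have hdc : d ≤ c - 1 := by
      rcases max_cases a c with ⟨he, hge⟩ | ⟨he, hlt⟩ <;> omega
    have := mul_le_mul_of_nonneg_right hdc (by omega : (0:Int) ≤ k)
    omega
  have hfuel : (t - a).toNat < (s - a * k).toNat + 1 := by
    rcases max_cases a c with ⟨he, hge⟩ | ⟨he, hlt⟩
    · rw [htdef, he]; omega
    · rw [htdef, he]
      have h1 : (k - 1) * (c - a - 1) ≥ 0 :=
        mul_nonneg (by omega) (by omega)
      have h2 : c - a ≤ s - a * k := by nlinarith [hceil.1]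
      omega
  have := initPLoop_aux k s t a ht hmin ((s - a * k).toNat + 1) 0
    le_rfl (by omega) (by omega)
  simpa using this

-- ===== VERDICT (by name: the statement is the Claim_ definition above) =====
theorem calc_py_spec : Claim_equal_calc_py := by
  intro W k _ hpre
  obtain ⟨hW, hk⟩ := hpre
  unfold Spec_calc_py calc_py calc_py_alt
  simp only [selectionSort_eq, pvS]
  set ws := PySem.List.sorted W (fun x => x) false with hwsdef
  have hws : ws.Pairwise (· ≤ ·) := PySem.List.sorted_pairwise W (fun x => x)
  have hwne : ws ≠ [] := by rw [hwsdef, Ne, PySem.List.sorted_eq_nil_iff]; exact hW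
  have hmax : (PySem.List.max? ws (fun x => x)).getD 0 = PySem.List.pyGetD ws (-1) 0 :=
    max_getD_of_sorted ws hwne hws
  rw [hmax, initPLoop_eq _ _ _ hk]
  have hcapne : List.replicate k.toNat (0 : Int) ≠ [] :=
    List.ne_nil_of_length_pos (by simp; omega)
  have hcapp : (List.replicate k.toNat (0 : Int)).Pairwise (· ≤ ·) :=
    List.pairwise_replicate.mpr (Or.inr le_rfl)
  have := outer_sim ws
    (((ws.map (fun w => max w 0)).sum
        - max (PySem.List.pyGetD ws (-1) 0) (-PySem.Int.floordiv (-ws.sum) k)).toNat + 1)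
    (max (PySem.List.pyGetD ws (-1) 0) (-PySem.Int.floordiv (-ws.sum) k))
    ws.length le_rfl (List.replicate k.toNat 0) hcapne hcapp
  rw [List.take_length] at this
  exact this
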